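-- pv_equiv track=rewrite | github.com/AdaCore/gnatstudio | share/support/core/align.py | get_commas
-- ===== SOURCE A (Python) =====
-- def get_commas(l):
--     n = 0
--     enabled = True
--     res = []
--     for k in range(0, len(l) - 1):
--         if l[k] == '"':
--             enabled = not enabled
--         elif enabled and l[k] == ',':
--             res.append(k)
--             n = n + 1
--     res.insert(0, n)
--     return res
-- ===== SOURCE B (Python) =====
-- def get_commas(l):
--     body = l[:-1]
--     res = [p for p, c in enumerate(body)
--            if c == ',' and sum(ch == '"' for ch in body[:p]) % 2 == 0]
--     return [len(res)] + res
-- ===== Notes on version B (the rewrite author's own statement) =====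
-- stated objective: simpler
-- what changed: Replaces the stateful scan that toggles a boolean flag and mutates a counter with a declarative one-liner: keep each comma position p of l[:-1] whose prefix l[:p] contains an even number of double quotes, then prepend the count.
import Mathlib
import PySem

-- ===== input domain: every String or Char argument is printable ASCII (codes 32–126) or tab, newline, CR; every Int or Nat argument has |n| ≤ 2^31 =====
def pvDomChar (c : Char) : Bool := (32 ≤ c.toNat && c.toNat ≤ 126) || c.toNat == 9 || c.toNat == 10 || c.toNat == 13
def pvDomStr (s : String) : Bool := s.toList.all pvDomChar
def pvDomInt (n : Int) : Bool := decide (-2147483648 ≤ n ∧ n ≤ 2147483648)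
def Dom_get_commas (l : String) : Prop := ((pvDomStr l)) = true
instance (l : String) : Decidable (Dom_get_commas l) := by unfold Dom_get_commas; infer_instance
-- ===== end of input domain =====

-- B replaces A's stateful quote-toggle scan by a declarative filter (keep each comma of
-- l[:-1] whose prefix holds an even number of quotes); objective: simpler, not faster.

-- ===== PORT A =====
-- state: (n, enabled, res), exactly A's three loop variables
def get_commas (l : String) : List Int :=
  let cs := l.toList
  let r := (PySem.List.pyRange 0 (PySem.Str.len l - 1) 1).foldl
    (fun (st : Int × Bool × List Int) (k : Int) =>
      if PySem.List.pyGetD cs k ' ' = '"' then (st.1, !st.2.1, st.2.2)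
      else if st.2.1 = true ∧ PySem.List.pyGetD cs k ' ' = ',' then (st.1 + 1, st.2.1, st.2.2 ++ [k])
      else st)
    (0, true, [])
  PySem.List.insert r.2.2 0 r.1

-- ===== PORT B =====
def get_commas_alt (l : String) : List Int :=
  let body := PySem.List.slice l.toList none (some (-1))
  let res := (PySem.List.enumerate body 0).foldl
    (fun (acc : List Int) (pc : Int × Char) =>
      if pc.2 = ',' ∧
         PySem.Int.mod (((PySem.List.slice body none (some pc.1)).map
           (fun ch => if ch = '"' then (1 : Int) else 0)).sum) 2 = 0
      then acc ++ [pc.1] else acc) []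
  ((res.length : Int)) :: res

-- ===== PRECONDITION & SPEC =====
def Spec_get_commas (l : String) (out : List Int) : Prop := out = get_commas_alt l
instance (l : String) (out : List Int) : Decidable (Spec_get_commas l out) := by unfold Spec_get_commas; infer_instance

-- ===== CLAIM (what is proved, stated in full; the proofs are below) =====
def Claim_equal_get_commas : Prop := ∀ (l : String), Dom_get_commas l → Spec_get_commas l (get_commas l)

-- ===== LEMMAS AND PROOFS =====

-- common characterization: positions of commas in cs (global index k) whose quote-prefix count q is even
def pvSpecF : List Char → Int → Nat → List Int
  | [], _, _ => []
  | c :: cs, k, q =>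
    if c = '"' then pvSpecF cs (k + 1) (q + 1)
    else if c = ',' ∧ q % 2 = 0 then k :: pvSpecF cs (k + 1) q
    else pvSpecF cs (k + 1) q

-- A's loop as structural recursion over the scanned characters
def pvRunA : List Char → Int → (Int × Bool × List Int) → (Int × Bool × List Int)
  | [], _, st => st
  | c :: cs, k, st =>
    pvRunA cs (k + 1)
      (if c = '"' then (st.1, !st.2.1, st.2.2)
       else if st.2.1 = true ∧ c = ',' then (st.1 + 1, st.2.1, st.2.2 ++ [k])
       else st)

theorem pvNotDecide (q : Nat) : (!decide (q % 2 = 0)) = decide ((q + 1) % 2 = 0) := by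
  have h : q % 2 = 0 ∨ q % 2 = 1 := by omega
  rcases h with h | h <;> simp [Nat.add_mod, h]

theorem pvRunA_spec (cs : List Char) : ∀ (k : Int) (q : Nat) (n : Int) (res : List Int),
    pvRunA cs k (n, decide (q % 2 = 0), res)
      = (n + ((pvSpecF cs k q).length : Int),
         decide ((q + (cs.count '"')) % 2 = 0),
         res ++ pvSpecF cs k q) := by
  induction cs with
  | nil => intro k q n res; simp [pvRunA, pvSpecF]
  | cons c cs ih =>
    intro k q n res
    by_cases hc : c = '"'
    · simp only [pvRunA, pvSpecF, hc, if_pos, pvNotDecide q]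
      rw [ih (k + 1) (q + 1) n res]
      simp
      omega
    · by_cases hcm : c = ',' ∧ q % 2 = 0
      · obtain ⟨hc1, hq⟩ := hcm
        have ih' := ih (k + 1) q (n + 1) (res ++ [k])
        rw [decide_eq_true hq] at ih'
        simp only [pvRunA, pvSpecF, hc1, decide_eq_true hq]
        simp only [and_self, true_and, if_true, if_pos hq, if_neg (show ¬ (',' = '"') from by decide)]
        rw [ih']
        simp
        omega
      · have hflag : ¬ (decide (q % 2 = 0) = true ∧ c = ',') := by
          intro h; exact hcm ⟨h.2, of_decide_eq_true h.1⟩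
        simp only [pvRunA, pvSpecF, if_neg hc, if_neg hflag, if_neg hcm, ih (k + 1) q n res]
        simp [hc]

theorem pvFoldA_runA (m : Nat) : ∀ (a : Nat) (cs : List Char) (st : Int × Bool × List Int),
    a + m ≤ cs.length →
    (PySem.List.pyRange (a : Int) ((a + m : Nat) : Int) 1).foldl
      (fun (st : Int × Bool × List Int) (k : Int) =>
        if PySem.List.pyGetD cs k ' ' = '"' then (st.1, !st.2.1, st.2.2)
        else if st.2.1 = true ∧ PySem.List.pyGetD cs k ' ' = ',' then (st.1 + 1, st.2.1, st.2.2 ++ [k])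
        else st) st
      = pvRunA ((cs.drop a).take m) (a : Int) st := by
  induction m with
  | zero =>
    intro a cs st _
    rw [PySem.List.pyRange_one_eq_nil (by omega)]
    simp [pvRunA]
  | succ m ih =>
    intro a cs st h
    have ha : a < cs.length := by omega
    rw [PySem.List.pyRange_one_cons (by push_cast; omega)]
    rw [List.foldl_cons]
    rw [List.drop_eq_getElem_cons ha, List.take_succ_cons]
    have hcast : ((a : Int) + 1) = (((a + 1 : Nat)) : Int) := by push_cast; ring
    have hcast2 : (((a + (m + 1) : Nat)) : Int) = (((a + 1) + m : Nat) : Int) := by push_cast; ring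
    rw [hcast2, hcast, ih (a + 1) cs _ (by omega)]
    simp only [pvRunA, PySem.List.pyGetD_natCast, List.getD_eq_getElem?_getD,
      List.getElem?_eq_getElem ha, Option.getD_some]
    rw [hcast]

theorem pvFoldB_spec (cs : List Char) : ∀ (a : Nat) (body : List Char) (acc : List Int),
    body.drop a = cs →
    (PySem.List.enumerate cs (a : Int)).foldl
      (fun (acc : List Int) (pc : Int × Char) =>
        if pc.2 = ',' ∧
           PySem.Int.mod (((PySem.List.slice body none (some pc.1)).map
             (fun ch => if ch = '"' then (1 : Int) else 0)).sum) 2 = 0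
        then acc ++ [pc.1] else acc) acc
      = acc ++ pvSpecF cs (a : Int) ((body.take a).count '"') := by
  induction cs with
  | nil => intro a body acc _; simp [pvSpecF]
  | cons c cs ih =>
    intro a body acc hdrop
    have ha : a < body.length := by
      have hlen := congrArg List.length hdrop
      simp only [List.length_drop, List.length_cons] at hlen
      omega
    have hget : body[a] = c := by
      rw [List.drop_eq_getElem_cons ha] at hdrop
      exact (List.cons.injEq _ _ _ _ ▸ hdrop).1
    have hdrop' : body.drop (a + 1) = cs := by
      rw [List.drop_eq_getElem_cons ha] at hdrop
      exact (List.cons.injEq _ _ _ _ ▸ hdrop).2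
    have htake : body.take (a + 1) = body.take a ++ [c] := by
      rw [List.take_add_one, List.getElem?_eq_getElem ha, hget]; rfl
    have hsum : (((PySem.List.slice body none (some ((a : Nat) : Int))).map
        (fun ch => if ch = '"' then (1 : Int) else 0)).sum) = (((body.take a).count '"' : Nat) : Int) := by
      rw [PySem.List.slice_to_natCast]
      have hfun : (fun ch => if ch = '"' then (1 : Int) else 0)
          = (fun ch => if (fun x => x == '"') ch = true then (1 : Int) else 0) := by
        funext ch; simp
      rw [hfun, PySem.List.sum_map_ite_one_zero]
      simp [List.count]
    rw [PySem.List.enumerate_cons, List.foldl_cons]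
    have hcast : ((a : Int) + 1) = (((a + 1 : Nat)) : Int) := by push_cast; ring
    by_cases hc : c = '"'
    · have hnc : ∀ (P : Prop), ¬ (c = ',' ∧ P) := fun P h => by
        rw [hc] at h; exact absurd h.1 (by decide)
      rw [if_neg (hnc _), hcast, ih (a + 1) body acc hdrop']
      simp only [pvSpecF, if_pos hc, htake]
      rw [List.count_append, hcast]
      simp [hc]
    · by_cases hcm : c = ',' ∧ ((body.take a).count '"') % 2 = 0
      · have hcond : c = ',' ∧
            PySem.Int.mod (((PySem.List.slice body none (some ((a : Nat) : Int))).map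
              (fun ch => if ch = '"' then (1 : Int) else 0)).sum) 2 = 0 := by
          refine ⟨hcm.1, ?_⟩
          rw [hsum, show (2 : Int) = ((2 : Nat) : Int) from by norm_num,
            PySem.Int.mod_natCast]
          exact_mod_cast hcm.2
        rw [if_pos hcond, hcast, ih (a + 1) body (acc ++ [(a : Int)]) hdrop']
        simp only [pvSpecF, if_neg hc, if_pos hcm, htake]
        rw [List.count_append, hcast]
        simp [hc]
      · have hcond : ¬ (c = ',' ∧
            PySem.Int.mod (((PySem.List.slice body none (some ((a : Nat) : Int))).map
              (fun ch => if ch = '"' then (1 : Int) else 0)).sum) 2 = 0) := by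
          intro h
          apply hcm
          obtain ⟨h1, h2⟩ := h
          rw [hsum, show (2 : Int) = ((2 : Nat) : Int) from by norm_num,
            PySem.Int.mod_natCast] at h2
          exact ⟨h1, by exact_mod_cast h2⟩
        rw [if_neg hcond, hcast, ih (a + 1) body acc hdrop']
        simp only [pvSpecF, if_neg hc, if_neg hcm, htake]
        rw [List.count_append, hcast]
        simp [hc]

theorem pvFoldA_runA0 (m : Nat) (cs : List Char) (st : Int × Bool × List Int)
    (h : m ≤ cs.length) :
    (PySem.List.pyRange 0 ((m : Nat) : Int) 1).foldl
      (fun (st : Int × Bool × List Int) (k : Int) =>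
        if PySem.List.pyGetD cs k ' ' = '"' then (st.1, !st.2.1, st.2.2)
        else if st.2.1 = true ∧ PySem.List.pyGetD cs k ' ' = ',' then (st.1 + 1, st.2.1, st.2.2 ++ [k])
        else st) st
      = pvRunA (cs.take m) 0 st := by
  have h0 := pvFoldA_runA m 0 cs st (by omega)
  simpa using h0

theorem pvFoldB_spec0 (body : List Char) :
    (PySem.List.enumerate body 0).foldl
      (fun (acc : List Int) (pc : Int × Char) =>
        if pc.2 = ',' ∧
           PySem.Int.mod (((PySem.List.slice body none (some pc.1)).map
             (fun ch => if ch = '"' then (1 : Int) else 0)).sum) 2 = 0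
        then acc ++ [pc.1] else acc) []
      = pvSpecF body 0 0 := by
  have h0 := pvFoldB_spec body 0 body [] (by simp)
  simpa using h0

-- ===== VERDICT (by name: the statement is the Claim_ definition above) =====
theorem get_commas_spec : Claim_equal_get_commas := by
  intro l _
  unfold Spec_get_commas get_commas get_commas_alt
  simp only [PySem.Str.len_eq, PySem.List.slice_to_neg_one]
  rcases hl : l.toList with _ | ⟨x, xs⟩
  · decide
  · have hlen : (((x :: xs).length : Int) - 1) = (((x :: xs).length - 1 : Nat) : Int) := by
      simp
    rw [hlen, pvFoldA_runA0 ((x :: xs).length - 1) (x :: xs) (0, true, []) (by omega)]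
    rw [show (x :: xs).take ((x :: xs).length - 1) = (x :: xs).dropLast from List.dropLast_eq_take.symm]
    rw [show ((0, true, []) : Int × Bool × List Int) = (0, decide ((0 : Nat) % 2 = 0), []) from by norm_num]
    rw [pvRunA_spec (x :: xs).dropLast 0 0 0 []]
    rw [pvFoldB_spec0 (x :: xs).dropLast, PySem.List.insert_zero]
    norm_num
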